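-- pv_equiv track=rewrite | github.com/andrewlasiter/fda-tools | plugins/fda_tools/scripts/alert_sender.py | format_alert_text
-- ===== SOURCE A (Python) =====
-- def format_alert_text(alert):
--     """Format a single alert as human-readable text."""
--     atype = alert.get("type", "unknown")
--     severity = alert.get("severity", "info").upper()
--     file_date = alert.get("_file_date", "")
--
--     lines = [f"[{severity}] {atype} — {file_date}"]
--
--     if atype == "new_clearance":
--         lines.append(f"  Device: {alert.get('device_name', 'N/A')}")
--         lines.append(f"  K-number: {alert.get('knumber', 'N/A')}")
--         lines.append(f"  Applicant: {alert.get('applicant', 'N/A')}")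
--         lines.append(f"  Product Code: {alert.get('product_code', 'N/A')}")
--     elif atype == "recall":
--         lines.append(f"  Firm: {alert.get('recalling_firm', 'N/A')}")
--         lines.append(f"  Classification: {alert.get('classification', 'N/A')}")
--         lines.append(f"  Reason: {alert.get('reason', 'N/A')}")
--     elif atype == "maude_event":
--         lines.append(f"  Event Type: {alert.get('event_type', 'N/A')}")
--         lines.append(f"  Count Since Last: {alert.get('count_since_last', 'N/A')}")
--         lines.append(f"  Product Code: {alert.get('product_code', 'N/A')}")
--     elif atype == "guidance_update":
--         lines.append(f"  Title: {alert.get('title', 'N/A')}")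
--         lines.append(f"  URL: {alert.get('url', 'N/A')}")
--     elif atype == "standard_update":
--         lines.append(f"  Standard: {alert.get('standard', 'N/A')}")
--         lines.append(f"  Old: {alert.get('old_version', 'N/A')} -> New: {alert.get('new_version', 'N/A')}")
--         lines.append(f"  Transition: {alert.get('transition_deadline', 'N/A')}")
--         lines.append(f"  Action: {alert.get('action_required', 'N/A')}")
--     else:
--         for k, v in alert.items():
--             if not k.startswith("_"):
--                 lines.append(f"  {k}: {v}")
--
--     return "\n".join(lines)
-- ===== SOURCE B (Python) =====
-- # Template-interpreter formatter: each alert type has a single body template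
-- # string with {key} placeholders; a tiny recursive substitution scanner fills
-- # it from the alert (default "N/A"), instead of appending hand-built lines.
-- _TEMPLATES = {
--     "new_clearance": "  Device: {device_name}\n  K-number: {knumber}\n"
--                      "  Applicant: {applicant}\n  Product Code: {product_code}",
--     "recall": "  Firm: {recalling_firm}\n  Classification: {classification}\n"
--               "  Reason: {reason}",
--     "maude_event": "  Event Type: {event_type}\n  Count Since Last: {count_since_last}\n"
--                    "  Product Code: {product_code}",
--     "guidance_update": "  Title: {title}\n  URL: {url}",
--     "standard_update": "  Standard: {standard}\n  Old: {old_version} -> New: {new_version}\n"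
--                        "  Transition: {transition_deadline}\n  Action: {action_required}",
-- }
--
--
-- def _fill(tpl, alert):
--     """Substitute every {key} in tpl with alert.get(key, 'N/A')."""
--     if tpl == "":
--         return ""
--     if tpl[0] == "{":
--         j = tpl.index("}")
--         return alert.get(tpl[1:j], "N/A") + _fill(tpl[j + 1:], alert)
--     return tpl[0] + _fill(tpl[1:], alert)
--
--
-- def format_alert_text(alert):
--     """Format a single alert as human-readable text."""
--     atype = alert.get("type", "unknown")
--     head = f"[{alert.get('severity', 'info').upper()}] {atype} — {alert.get('_file_date', '')}"
--     tpl = _TEMPLATES.get(atype)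
--     if tpl is None:
--         body = [f"  {k}: {v}" for k, v in alert.items() if not k.startswith("_")]
--         return "\n".join([head] + body)
--     return head + "\n" + _fill(tpl, alert)
-- ===== Notes on version B (the rewrite author's own statement) =====
-- stated objective: alternative
-- what changed: Replaced the if/elif chain of hand-appended f-string lines by one body-template string per alert type plus a tiny recursive {key}-substitution interpreter (_fill) that scans the template and splices in alert.get(key, 'N/A'); the items()-scan remains only as the fallback for unknown types.
import Mathlib
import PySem

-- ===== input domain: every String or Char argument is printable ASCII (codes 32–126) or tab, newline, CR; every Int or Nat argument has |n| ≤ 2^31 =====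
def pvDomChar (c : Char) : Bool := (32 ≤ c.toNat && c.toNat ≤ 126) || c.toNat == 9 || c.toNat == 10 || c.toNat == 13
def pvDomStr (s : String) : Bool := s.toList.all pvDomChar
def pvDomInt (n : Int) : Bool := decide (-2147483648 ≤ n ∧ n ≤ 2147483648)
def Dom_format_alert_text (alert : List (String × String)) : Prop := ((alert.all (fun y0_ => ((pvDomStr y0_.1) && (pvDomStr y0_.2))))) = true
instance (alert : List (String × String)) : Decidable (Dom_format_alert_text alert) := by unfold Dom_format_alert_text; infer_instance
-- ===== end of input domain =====

-- B replaces A's if/elif chain of hand-appended lines by one body TEMPLATE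
-- string per type, filled by a small recursive {key}-substitution scanner
-- (objective: alternative — a template-interpreter formulation of the task).

-- ===== PORT A =====
def format_alert_text (alert : List (String × String)) : String :=
  let d := PySem.Dict.ofList alert
  let atype := d.getD "type" "unknown"
  let severity := PySem.Str.upper (d.getD "severity" "info")
  let file_date := d.getD "_file_date" ""
  let lines : List String := ["[" ++ severity ++ "] " ++ atype ++ " — " ++ file_date]
  let lines :=
    if atype = "new_clearance" then
      lines ++ ["  Device: " ++ d.getD "device_name" "N/A"]
            ++ ["  K-number: " ++ d.getD "knumber" "N/A"]
            ++ ["  Applicant: " ++ d.getD "applicant" "N/A"]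
            ++ ["  Product Code: " ++ d.getD "product_code" "N/A"]
    else if atype = "recall" then
      lines ++ ["  Firm: " ++ d.getD "recalling_firm" "N/A"]
            ++ ["  Classification: " ++ d.getD "classification" "N/A"]
            ++ ["  Reason: " ++ d.getD "reason" "N/A"]
    else if atype = "maude_event" then
      lines ++ ["  Event Type: " ++ d.getD "event_type" "N/A"]
            ++ ["  Count Since Last: " ++ d.getD "count_since_last" "N/A"]
            ++ ["  Product Code: " ++ d.getD "product_code" "N/A"]
    else if atype = "guidance_update" then
      lines ++ ["  Title: " ++ d.getD "title" "N/A"]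
            ++ ["  URL: " ++ d.getD "url" "N/A"]
    else if atype = "standard_update" then
      lines ++ ["  Standard: " ++ d.getD "standard" "N/A"]
            ++ ["  Old: " ++ d.getD "old_version" "N/A" ++ " -> New: " ++ d.getD "new_version" "N/A"]
            ++ ["  Transition: " ++ d.getD "transition_deadline" "N/A"]
            ++ ["  Action: " ++ d.getD "action_required" "N/A"]
    else
      d.items.foldl (fun acc kv =>
        if !(PySem.Str.startswith kv.1 "_") then acc ++ ["  " ++ kv.1 ++ ": " ++ kv.2]
        else acc) lines
  PySem.Str.join "\n" lines

-- ===== PORT B =====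
-- the module-level _TEMPLATES dict of Source B
def fatTemplates : PySem.Dict String String :=
  PySem.Dict.ofList
    [ ("new_clearance", "  Device: {device_name}\n  K-number: {knumber}\n  Applicant: {applicant}\n  Product Code: {product_code}"),
      ("recall", "  Firm: {recalling_firm}\n  Classification: {classification}\n  Reason: {reason}"),
      ("maude_event", "  Event Type: {event_type}\n  Count Since Last: {count_since_last}\n  Product Code: {product_code}"),
      ("guidance_update", "  Title: {title}\n  URL: {url}"),
      ("standard_update", "  Standard: {standard}\n  Old: {old_version} -> New: {new_version}\n  Transition: {transition_deadline}\n  Action: {action_required}") ]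

-- Source B's _fill, on the template's character list (tpl[0], tpl.index("}"), the
-- slices tpl[1:j] / tpl[j+1:] become head / takeWhile / dropWhile on chars;
-- exact here because our templates always close every '{' with a '}')
def fatFill (d : PySem.Dict String String) : List Char → String
  | [] => ""
  | c :: rest =>
    if c = '{' then
      let key := rest.takeWhile (fun x => x ≠ '}')
      let rest' := (rest.dropWhile (fun x => x ≠ '}')).drop 1
      d.getD (String.ofList key) "N/A" ++ fatFill d rest'
    else String.ofList [c] ++ fatFill d rest
  termination_by l => l.length
  decreasing_by
  · have h1 := List.length_dropWhile_le (fun x => !decide (x = '}')) rest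
    simp; omega
  · simp

def format_alert_text_alt (alert : List (String × String)) : String :=
  let d := PySem.Dict.ofList alert
  let atype := d.getD "type" "unknown"
  let head := "[" ++ PySem.Str.upper (d.getD "severity" "info") ++ "] " ++ atype ++ " — "
                ++ d.getD "_file_date" ""
  match fatTemplates.get? atype with
  | none =>
      let body := (d.items.filter (fun kv => !(PySem.Str.startswith kv.1 "_"))).map
        (fun kv => "  " ++ kv.1 ++ ": " ++ kv.2)
      PySem.Str.join "\n" ([head] ++ body)
  | some tpl => head ++ "\n" ++ fatFill d tpl.toList

-- ===== PRECONDITION & SPEC =====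
def Spec_format_alert_text (alert : List (String × String)) (out : String) : Prop := out = format_alert_text_alt alert
instance (alert : List (String × String)) (out : String) : Decidable (Spec_format_alert_text alert out) := by unfold Spec_format_alert_text; infer_instance

-- ===== CLAIM (what is proved, stated in full; the proofs are below) =====
def Claim_equal_format_alert_text : Prop := ∀ (alert : List (String × String)), Dom_format_alert_text alert → Spec_format_alert_text alert (format_alert_text alert)

-- ===== LEMMAS AND PROOFS =====

theorem fatTemplates_items : fatTemplates = PySem.Dict.mk
    [ ("new_clearance", "  Device: {device_name}\n  K-number: {knumber}\n  Applicant: {applicant}\n  Product Code: {product_code}"),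
      ("recall", "  Firm: {recalling_firm}\n  Classification: {classification}\n  Reason: {reason}"),
      ("maude_event", "  Event Type: {event_type}\n  Count Since Last: {count_since_last}\n  Product Code: {product_code}"),
      ("guidance_update", "  Title: {title}\n  URL: {url}"),
      ("standard_update", "  Standard: {standard}\n  Old: {old_version} -> New: {new_version}\n  Transition: {transition_deadline}\n  Action: {action_required}") ] := by
  rfl

theorem format_alert_text_spec : Claim_equal_format_alert_text := by
  unfold Claim_equal_format_alert_text
  intro alert _
  unfold Spec_format_alert_text format_alert_text format_alert_text_alt
  set d := PySem.Dict.ofList alert with hd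
  by_cases h1 : d.getD "type" "unknown" = "new_clearance"
  · refine String.toList_inj.mp ?_
    simp [h1, fatTemplates_items, PySem.Dict.get?_mk_cons, fatFill, PySem.Str.join, PySem.Chars.join, List.intercalate]
  · by_cases h2 : d.getD "type" "unknown" = "recall"
    · refine String.toList_inj.mp ?_
      simp [h2, fatTemplates_items, PySem.Dict.get?_mk_cons, fatFill, PySem.Str.join, PySem.Chars.join, List.intercalate]
    · by_cases h3 : d.getD "type" "unknown" = "maude_event"
      · refine String.toList_inj.mp ?_
        simp [h3, fatTemplates_items, PySem.Dict.get?_mk_cons, fatFill, PySem.Str.join, PySem.Chars.join, List.intercalate]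
      · by_cases h4 : d.getD "type" "unknown" = "guidance_update"
        · refine String.toList_inj.mp ?_
          simp [h4, fatTemplates_items, PySem.Dict.get?_mk_cons, fatFill, PySem.Str.join, PySem.Chars.join, List.intercalate]
        · by_cases h5 : d.getD "type" "unknown" = "standard_update"
          · refine String.toList_inj.mp ?_
            simp [h5, fatTemplates_items, PySem.Dict.get?_mk_cons, fatFill, PySem.Str.join, PySem.Chars.join, List.intercalate]
          · have hget : fatTemplates.get? (d.getD "type" "unknown") = none := by
              rw [fatTemplates_items]
              simp [PySem.Dict.get?, Ne.symm h1, Ne.symm h2,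
                    Ne.symm h3, Ne.symm h4, Ne.symm h5]
            simp only [h1, h2, h3, h4, h5, if_false, hget]
            rw [PySem.List.foldl_append_if
                  (p := fun kv : String × String => !(PySem.Str.startswith kv.1 "_"))
                  (f := fun kv : String × String => "  " ++ kv.1 ++ ": " ++ kv.2)]
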